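-- pv_equiv track=rewrite | github.com/minu0508/Algorithm | Python/Programmers/Level_1/신고 결과 받기.py | solution
-- ===== SOURCE A (Python) =====
-- import collections as col
--
-- def solution(id_list, report, k):
--     answer = [0] * len(id_list)
--     report = list(set(report))
--     rep = col.defaultdict(set)
--     count = col.defaultdict(int)
--     for i in report:
--         Save1, Save2 = i.split(" ")
--         rep[Save1].add(Save2)
--         count[Save2] += 1
--
--
--     for j in range(len(id_list)):
--         for l in rep[id_list[j]]:
--             if (count[l] >= k):
--                 answer[j] += 1
--
--     return answer
-- ===== SOURCE B (Python) =====
-- def solution(id_list, report, k):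
--     pairs = []
--     count = {}
--     for r in dict.fromkeys(report):          # distinct report strings, first-seen order
--         reporter, target = r.split(" ")
--         pairs.append((reporter, target))
--         count[target] = count.get(target, 0) + 1
--     return [sum(1 for a, t in pairs if a == u and count[t] >= k) for u in id_list]
-- ===== Notes on version B (the rewrite author's own statement) =====
-- stated objective: simpler
-- what changed: Replaces the defaultdict-of-sets per-reporter map and the nested index loop that mutates an answer array by one flat pass over the deduplicated reports building a (reporter, target) pair list plus a target count, followed by a per-id comprehension counting matching pairs.
import Mathlib
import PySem

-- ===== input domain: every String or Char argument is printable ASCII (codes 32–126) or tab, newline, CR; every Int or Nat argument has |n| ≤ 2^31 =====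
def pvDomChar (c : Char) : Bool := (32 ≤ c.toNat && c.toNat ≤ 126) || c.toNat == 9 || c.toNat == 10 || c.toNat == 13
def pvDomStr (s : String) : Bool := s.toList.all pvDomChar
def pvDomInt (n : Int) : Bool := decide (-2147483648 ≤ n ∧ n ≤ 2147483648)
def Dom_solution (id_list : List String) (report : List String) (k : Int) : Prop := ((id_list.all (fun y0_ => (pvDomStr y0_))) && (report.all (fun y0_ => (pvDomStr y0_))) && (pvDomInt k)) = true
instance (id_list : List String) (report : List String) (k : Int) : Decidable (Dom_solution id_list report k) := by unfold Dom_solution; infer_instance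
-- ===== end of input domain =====

-- B replaces A's defaultdict-of-sets + nested index loop mutating an answer array by one flat
-- pass building a (reporter, target) pair list and a target count, then a per-id comprehension;
-- same return value on Pre_ (every report entry splits into exactly two fields).

-- ===== PORT A =====
-- loop body of 'for i in report: Save1, Save2 = i.split(" "); rep[Save1].add(Save2); count[Save2] += 1'
def aStep (st : PySem.Dict String (PySem.Set String) × PySem.Dict String Int) (i : String) :
    PySem.Dict String (PySem.Set String) × PySem.Dict String Int :=
  match PySem.Str.split? i " " with
  | some [s1, s2] =>
      (st.1.modify s1 PySem.Set.empty (fun s => PySem.Set.add s s2), st.2.modify s2 0 (· + 1))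
  | _ => st  -- unreachable under Pre_ (the Python raises ValueError here)

def solution (id_list : List String) (report : List String) (k : Int) : List Int :=
  let answer : List Int := List.replicate id_list.length 0
  let report' := PySem.Set.ofList report
  let st := report'.foldl aStep (PySem.Dict.empty, PySem.Dict.empty)
  (PySem.List.pyRange 0 (id_list.length : Int) 1).foldl (fun ans j =>
      (PySem.Dict.getD st.1 (PySem.List.pyGetD id_list j "") PySem.Set.empty).foldl (fun a l =>
          if k ≤ PySem.Dict.getD st.2 l 0 then
            PySem.List.pySetD a j (PySem.List.pyGetD a j 0 + 1)
          else a) ans) answer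

-- ===== PORT B =====
-- loop body of 'for r in dict.fromkeys(report): reporter, target = r.split(" "); pairs.append(…); count[target] += 1'
def bStep (st : List (String × String) × PySem.Dict String Int) (r : String) :
    List (String × String) × PySem.Dict String Int :=
  match PySem.Str.split? r " " with
  | some [a, t] => (st.1 ++ [(a, t)], st.2.modify t 0 (· + 1))
  | _ => st  -- unreachable under Pre_ (the Python raises ValueError here)

def solution_alt (id_list : List String) (report : List String) (k : Int) : List Int :=
  let st := (PySem.List.dedup report).foldl bStep ([], PySem.Dict.empty)
  id_list.map (fun u =>
    ((st.1.countP (fun p => p.1 == u && decide (k ≤ PySem.Dict.getD st.2 p.2 0)) : Nat) : Int))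

-- ===== PRECONDITION & SPEC =====
-- Pre_ excludes exactly the inputs where some report entry does not split into two fields on " ",
-- on which Python's unpacking 'Save1, Save2 = i.split(" ")' raises ValueError.
def Pre_solution (id_list : List String) (report : List String) (k : Int) : Prop :=
  ∀ r ∈ report, ((PySem.Str.split? r " ").getD []).length = 2
instance (id_list : List String) (report : List String) (k : Int) : Decidable (Pre_solution id_list report k) := by unfold Pre_solution; infer_instance

def pvWitness_solution : List String × List String × Int :=
  (["muzi", "frodo", "apeach"], ["muzi frodo", "apeach frodo", "muzi frodo"], 2)

def Spec_solution (id_list : List String) (report : List String) (k : Int) (out : List Int) : Prop := out = solution_alt id_list report k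
instance (id_list : List String) (report : List String) (k : Int) (out : List Int) : Decidable (Spec_solution id_list report k out) := by unfold Spec_solution; infer_instance

-- ===== CLAIM (what is proved, stated in full; the proofs are below) =====
def Claim_equal_solution : Prop := ∀ (id_list : List String) (report : List String) (k : Int), Dom_solution id_list report k → Pre_solution id_list report k → Spec_solution id_list report k (solution id_list report k)

-- ===== LEMMAS AND PROOFS =====

-- proof-side view of one report entry: the (reporter, target) pair, if it unpacks
def pvParse (r : String) : Option (String × String) :=
  match PySem.Str.split? r " " with
  | some [a, t] => some (a, t)
  | _ => none

-- PySem.Chars.splitOn with a single-character separator is Lean's List.splitOn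
theorem pvSplitOn_cons_self (c : Char) (rest : List Char) :
    List.splitOn c (c :: rest) = [] :: List.splitOn c rest := by
  simp [List.splitOn, List.splitOnP_cons]

theorem pvSplitOn_cons_ne (c x : Char) (rest : List Char) (hx : ¬ x = c) :
    List.splitOn c (x :: rest) = (List.splitOn c rest).modifyHead (x :: ·) := by
  simp [List.splitOn, List.splitOnP_cons, hx]

theorem pvSplitOn_go_eq (c : Char) :
    ∀ (fuel : Nat) (l cur : List Char) (acc : List (List Char)), l.length < fuel →
      PySem.Chars.splitOn.go [c] fuel l cur acc
        = acc.reverse ++ (List.splitOn c l).modifyHead (cur.reverse ++ ·) := by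
  intro fuel
  induction fuel with
  | zero => intro l cur acc h; omega
  | succ f ih =>
    intro l cur acc h
    cases l with
    | nil =>
      simp [PySem.Chars.splitOn.go, List.splitOn]
    | cons x rest =>
      rw [PySem.Chars.splitOn.go]
      by_cases hx : x = c
      · subst hx
        have hp : [x].isPrefixOf (x :: rest) = true := by simp [List.isPrefixOf]
        simp only [hp, if_true, List.length_cons, List.drop_succ_cons, List.length_nil,
          List.drop_zero]
        rw [ih rest [] (cur.reverse :: acc) (by simpa using Nat.lt_of_succ_lt_succ h)]
        rw [pvSplitOn_cons_self]
        rcases hs : List.splitOn x rest with _ | ⟨h0, t0⟩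
        · exact absurd hs (List.splitOnP_ne_nil _ _)
        · simp
      · have hp : [c].isPrefixOf (x :: rest) = false := by
          simp [List.isPrefixOf]; exact fun hc => absurd hc.symm hx
        simp only [hp, Bool.false_eq_true, if_false]
        rw [ih rest (x :: cur) acc (by simpa using Nat.lt_of_succ_lt_succ h)]
        rw [pvSplitOn_cons_ne c x rest hx]
        rcases hs : List.splitOn c rest with _ | ⟨h0, t0⟩
        · exact absurd hs (List.splitOnP_ne_nil _ _)
        · simp


theorem pvSplitOn_single (c : Char) (s : List Char) :
    PySem.Chars.splitOn s [c] = List.splitOn c s := by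
  rw [PySem.Chars.splitOn, pvSplitOn_go_eq c _ _ _ _ (by omega)]
  rcases hs : List.splitOn c s with _ | ⟨h0, t0⟩
  · exact absurd hs (List.splitOnP_ne_nil _ _)
  · simp

theorem pvSplit?_eq (s : String) :
    PySem.Str.split? s " " = some ((List.splitOn ' ' s.toList).map String.ofList) := by
  rw [PySem.Str.split?]
  have : (" " : String).toList = [' '] := rfl
  rw [this, PySem.Chars.split?]
  simp [pvSplitOn_single]


-- reconstruction: a two-field entry is determined by its fields
theorem pvParse_recon (r a t : String) (h : pvParse r = some (a, t)) :
    r.toList = a.toList ++ ' ' :: t.toList := by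
  rw [pvParse, pvSplit?_eq] at h
  rcases hs : List.splitOn ' ' r.toList with _ | ⟨h0, t0⟩
  · exact absurd hs (List.splitOnP_ne_nil _ _)
  · rw [hs] at h
    rcases t0 with _ | ⟨h1, t1⟩
    · simp at h
    · rcases t1 with _ | ⟨h2, t2⟩
      · simp at h
        have := List.intercalate_splitOn r.toList ' '
        rw [hs] at this
        rw [← this]
        simp [List.intercalate, ← h.1, ← h.2, String.toList_ofList]
      · simp at h


theorem pvParse_inj (r r' : String) (p : String × String)
    (h : pvParse r = some p) (h' : pvParse r' = some p) : r = r' := by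
  have e1 := pvParse_recon r p.1 p.2 h
  have e2 := pvParse_recon r' p.1 p.2 h'
  have : r.toList = r'.toList := by rw [e1, e2]
  exact String.toList_inj.mp this


-- product folds project componentwise
theorem pvFoldl_snd {α β γ : Type} (f : α × β → γ → α × β) (g : β → γ → β)
    (hfg : ∀ st x, (f st x).2 = g st.2 x) :
    ∀ (l : List γ) (st : α × β), (l.foldl f st).2 = l.foldl g st.2 := by
  intro l
  induction l with
  | nil => intro st; rfl
  | cons x xs ih => intro st; simp only [List.foldl_cons, ih, hfg]

theorem pvFoldl_fst {α β γ : Type} (f : α × β → γ → α × β) (g : α → γ → α)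
    (hfg : ∀ st x, (f st x).1 = g st.1 x) :
    ∀ (l : List γ) (st : α × β), (l.foldl f st).1 = l.foldl g st.1 := by
  intro l
  induction l with
  | nil => intro st; rfl
  | cons x xs ih => intro st; simp only [List.foldl_cons, ih, hfg]

-- the shared count dictionary
def pvCStep (d : PySem.Dict String Int) (r : String) : PySem.Dict String Int :=
  match pvParse r with
  | some (_, t) => d.modify t 0 (· + 1)
  | none => d

theorem pvAStep_snd (st : PySem.Dict String (PySem.Set String) × PySem.Dict String Int)
    (r : String) : (aStep st r).2 = pvCStep st.2 r := by
  rcases hs : PySem.Str.split? r " " with _ | l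
  · simp [aStep, pvCStep, pvParse, hs]
  · rcases l with _ | ⟨a, _ | ⟨b, _ | _⟩⟩ <;> simp [aStep, pvCStep, pvParse, hs]


theorem pvBStep_snd (st : List (String × String) × PySem.Dict String Int)
    (r : String) : (bStep st r).2 = pvCStep st.2 r := by
  rcases hs : PySem.Str.split? r " " with _ | l
  · simp [bStep, pvCStep, pvParse, hs]
  · rcases l with _ | ⟨a, _ | ⟨b, _ | _⟩⟩ <;> simp [bStep, pvCStep, pvParse, hs]


-- B's pair list is the filterMap of pvParse
theorem pvPairs_eq (l : List String) :
    ∀ ps : List (String × String),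
      l.foldl (fun ps r => match pvParse r with
                           | some q => ps ++ [q]
                           | none => ps) ps = ps ++ l.filterMap pvParse := by
  induction l with
  | nil => intro ps; simp
  | cons r rs ih =>
    intro ps
    rcases hp : pvParse r with _ | q <;>
      simp [List.foldl_cons, List.filterMap_cons, hp, ih]


theorem pvBStep_fst (st : List (String × String) × PySem.Dict String Int)
    (r : String) :
    (bStep st r).1 = (match pvParse r with
                      | some q => st.1 ++ [q]
                      | none => st.1) := by
  rcases hs : PySem.Str.split? r " " with _ | l
  · simp [bStep, pvParse, hs]
  · rcases l with _ | ⟨a, _ | ⟨b, _ | _⟩⟩ <;> simp [bStep, pvParse, hs]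


-- A's rep dictionary, read back at a key
theorem pvAStep_fst (st : PySem.Dict String (PySem.Set String) × PySem.Dict String Int)
    (r : String) :
    (aStep st r).1 = (match pvParse r with
                      | some q => st.1.modify q.1 PySem.Set.empty (fun s => PySem.Set.add s q.2)
                      | none => st.1) := by
  rcases hs : PySem.Str.split? r " " with _ | l
  · simp [aStep, pvParse, hs]
  · rcases l with _ | ⟨a, _ | ⟨b, _ | _⟩⟩ <;> simp [aStep, pvParse, hs]


theorem pvRep_foldl (l : List String) :
    ∀ d : PySem.Dict String (PySem.Set String),
      l.foldl (fun d r => match pvParse r with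
                          | some q => d.modify q.1 PySem.Set.empty (fun s => PySem.Set.add s q.2)
                          | none => d) d
        = (l.filterMap pvParse).foldl
            (fun d q => d.modify q.1 PySem.Set.empty (fun s => PySem.Set.add s q.2)) d := by
  induction l with
  | nil => intro d; rfl
  | cons r rs ih =>
    intro d
    rcases hp : pvParse r with _ | q <;>
      · simp only [List.foldl_cons, List.filterMap_cons, hp]; exact ih _


theorem pvRep_getD (ps : List (String × String)) :
    ∀ (d : PySem.Dict String (PySem.Set String)) (x : String),
      (ps.foldl (fun d q => d.modify q.1 PySem.Set.empty (fun s => PySem.Set.add s q.2)) d).getD x PySem.Set.empty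
        = PySem.Set.update (d.getD x PySem.Set.empty) ((ps.filter (fun q => q.1 == x)).map (·.2)) := by
  induction ps with
  | nil => intro d x; simp [PySem.Set.update]
  | cons q qs ih =>
    intro d x
    simp only [List.foldl_cons, ih, List.filter_cons]
    by_cases hqx : q.1 = x
    · simp [hqx, PySem.Dict.getD_modify, PySem.Set.update]
    · have : (q.1 == x) = false := by simp [hqx]
      simp [this, PySem.Dict.getD_modify, Ne.symm hqx]


-- the inner loop of A: repeated answer[j] += 1 is a countP
theorem pvInner (pk : String → Prop) [DecidablePred pk] (jn : Nat) :
    ∀ (s : List String) (ans : List Int), jn < ans.length →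
      s.foldl (fun a l => if pk l then
                  PySem.List.pySetD a (jn : Int) (PySem.List.pyGetD a (jn : Int) 0 + 1)
                else a) ans
        = PySem.List.pySetD ans (jn : Int)
            (PySem.List.pyGetD ans (jn : Int) 0 + (s.countP (fun l => decide (pk l)) : Int)) := by
  intro s
  induction s with
  | nil =>
    intro ans h
    simp only [List.foldl_nil, List.countP_nil, Nat.cast_zero, add_zero,
      PySem.List.pySetD_natCast, PySem.List.pyGetD_natCast, List.getD_eq_getElem _ _ h,
      List.set_getElem_self]
  | cons x xs ih =>
    intro ans h
    by_cases hx : pk x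
    · simp only [List.foldl_cons, hx, if_true]
      rw [ih _ (by simpa using h)]
      simp only [PySem.List.pySetD_natCast, PySem.List.pyGetD_natCast]
      rw [List.getD_eq_getElem _ _ (show jn < (ans.set jn (ans.getD jn 0 + 1)).length by simpa using h)]
      rw [List.getElem_set_self, List.set_set, List.getD_eq_getElem _ _ h]
      have : (List.countP (fun l => decide (pk l)) (x :: xs) : Int)
          = (List.countP (fun l => decide (pk l)) xs : Int) + 1 := by
        simp [List.countP_cons, hx]
      rw [this]; ring_nf
    · simp only [List.foldl_cons, hx, if_false]
      rw [ih _ h]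
      have : (List.countP (fun l => decide (pk l)) (x :: xs) : Int)
          = (List.countP (fun l => decide (pk l)) xs : Int) := by
        simp [List.countP_cons, hx]
      rw [this]


-- the outer loop of A fills the answer array position by position
theorem pvOuter (S : Nat → List String) (pk : String → Prop) [DecidablePred pk] (m : Nat) :
    ∀ n, n ≤ m →
      (List.range n).foldl (fun ans jn =>
          (S jn).foldl (fun a l => if pk l then
              PySem.List.pySetD a (jn : Int) (PySem.List.pyGetD a (jn : Int) 0 + 1)
            else a) ans) (List.replicate m (0 : Int))
        = (List.range n).map (fun jn => ((S jn).countP (fun l => decide (pk l)) : Int))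
            ++ List.replicate (m - n) (0 : Int) := by
  intro n
  induction n with
  | zero => intro h; simp
  | succ n ih =>
    intro h
    rw [List.range_succ, List.foldl_append, List.foldl_cons, List.foldl_nil, ih (by omega)]
    obtain ⟨d, hd⟩ : ∃ d, m - n = d + 1 := ⟨m - (n+1), by omega⟩
    have hd' : m - (n+1) = d := by omega
    rw [hd, hd']
    have hlen : n < ((List.range n).map (fun jn => ((S jn).countP (fun l => decide (pk l)) : Int))
        ++ List.replicate (d+1) (0 : Int)).length := by
      simp
    rw [pvInner pk n _ _ hlen]
    simp only [PySem.List.pySetD_natCast, PySem.List.pyGetD_natCast]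
    rw [List.getD_eq_getElem _ _ hlen, List.getElem_append_right (by simp)]
    rw [List.set_append_right _ _ (by simp)]
    simp [List.range_succ, List.replicate_succ]


-- ===== VERDICT (by name: the statement is the Claim_ definition above) =====
theorem pvRange_cast (n : Nat) :
    PySem.List.pyRange 0 (n : Int) 1 = (List.range n).map (fun (jn : Nat) => (jn : Int)) := by
  rw [PySem.List.pyRange_of_pos 0 n (by norm_num)]
  by_cases hn : (0 : Int) < (n : Int)
  · rw [if_pos hn]
    have h1 : ((((n : Int)) - 0 + 1 - 1) / 1).toNat = n := by norm_num
    rw [h1]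
    exact List.map_congr_left (fun a _ => by ring)
  · have : n = 0 := by omega
    subst this
    simp

theorem solution_spec : Claim_equal_solution := by
  intro id_list report k _ _
  show solution id_list report k = solution_alt id_list report k
  rw [solution, solution_alt, PySem.List.dedup_eq_ofList]
  set dd := PySem.Set.ofList report with hdd
  set ps := dd.filterMap pvParse with hps
  -- shared count dictionary
  have hA2 : (dd.foldl aStep (PySem.Dict.empty, PySem.Dict.empty)).2
      = dd.foldl pvCStep PySem.Dict.empty := pvFoldl_snd _ _ pvAStep_snd dd _
  have hB2 : (dd.foldl bStep ([], PySem.Dict.empty)).2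
      = dd.foldl pvCStep PySem.Dict.empty := pvFoldl_snd _ _ pvBStep_snd dd _
  set c := dd.foldl pvCStep PySem.Dict.empty with hc
  -- B's pair list
  have hB1 : (dd.foldl bStep ([], PySem.Dict.empty)).1 = ps := by
    rw [pvFoldl_fst bStep (fun l r => match pvParse r with | some q => l ++ [q] | none => l) pvBStep_fst dd _, pvPairs_eq]
    simpa using hps.symm
  -- A's rep dictionary, read back
  have hA1 : ∀ x : String,
      PySem.Dict.getD (dd.foldl aStep (PySem.Dict.empty, PySem.Dict.empty)).1 x PySem.Set.empty
        = PySem.Set.ofList ((ps.filter (fun q => q.1 == x)).map (·.2)) := by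
    intro x
    rw [pvFoldl_fst aStep (fun d r => match pvParse r with | some q => d.modify q.1 PySem.Set.empty (fun s => PySem.Set.add s q.2) | none => d) pvAStep_fst dd _, pvRep_foldl, pvRep_getD]
    rw [PySem.Dict.getD_empty]
    exact PySem.Set.update_nil_left _
  -- the pair list has no duplicates
  have hnodup : ps.Nodup := by
    refine List.Nodup.filterMap (fun a a' b hb hb' => pvParse_inj a a' b hb hb') ?_
    exact PySem.Set.nodup_ofList report
  have hsec : ∀ x : String, ((ps.filter (fun q => q.1 == x)).map (·.2)).Nodup := by
    intro x
    refine List.Nodup.map_on ?_ (List.Nodup.filter _ hnodup)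
    intro q hq q' hq' hsnd
    have h1 : q.1 = x := by simpa using (List.mem_filter.mp hq).2
    have h2 : q'.1 = x := by simpa using (List.mem_filter.mp hq').2
    exact Prod.ext (h1.trans h2.symm) hsnd
  -- evaluate A's nested index loop
  rw [hA2, hB2, hB1, pvRange_cast, List.foldl_map]
  have houter := pvOuter (fun jn => PySem.Dict.getD
      (dd.foldl aStep (PySem.Dict.empty, PySem.Dict.empty)).1
      (id_list.getD jn "") PySem.Set.empty)
    (fun l => k ≤ PySem.Dict.getD c l 0) id_list.length id_list.length le_rfl
  simp only [PySem.List.pyGetD_natCast] at houter ⊢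
  rw [houter, Nat.sub_self, List.replicate_zero, List.append_nil]
  -- compare elementwise with B's comprehension
  apply List.ext_getElem
  · simp
  intro jn h1 h2
  simp only [List.getElem_map, List.getElem_range]
  have hjn : jn < id_list.length := by simpa using h1
  have hgd : id_list.getD jn "" = id_list[jn] := List.getD_eq_getElem _ _ hjn
  rw [hgd, hA1, PySem.Set.ofList_eq_self_of_nodup _ (hsec _)]
  rw [List.countP_map, List.countP_filter]
  refine congrArg _ (List.countP_congr (fun q _ => ?_))
  simp only [Function.comp_apply]
  rw [Bool.and_comm]
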